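-- pv_equiv track=rewrite | github.com/tizianocitro/ds-and-algo | patterns/modified_binary_search/next_letter.py | searchNextLetter
-- ===== SOURCE A (Python) =====
-- def searchNextLetter(letters, key):
--     left, right = 0, len(letters) - 1
--     while left <= right:
--         middle = (left + right) // 2
--         current = letters[middle]
--
--         if current > key:
--             right = middle - 1
--         else:
--             left = middle + 1
--
--     return letters[left % len(letters)]
-- ===== SOURCE B (Python) =====
-- def searchNextLetter(letters, key):
--     i = next((j for j, c in enumerate(letters) if c > key), len(letters))
--     return letters[i % len(letters)]
-- ===== Notes on version B (the rewrite author's own statement) =====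
-- stated objective: simpler
-- what changed: Replaces the hand-rolled binary-search loop with a single left-to-right scan (next over enumerate) for the first element strictly greater than key, keeping the same 'index % len' wraparound.
-- outside the precondition, e.g. on searchNextLetter(['c', 'a', 'b'], 'a'): A returns 'b', B returns 'c'
import Mathlib
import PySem

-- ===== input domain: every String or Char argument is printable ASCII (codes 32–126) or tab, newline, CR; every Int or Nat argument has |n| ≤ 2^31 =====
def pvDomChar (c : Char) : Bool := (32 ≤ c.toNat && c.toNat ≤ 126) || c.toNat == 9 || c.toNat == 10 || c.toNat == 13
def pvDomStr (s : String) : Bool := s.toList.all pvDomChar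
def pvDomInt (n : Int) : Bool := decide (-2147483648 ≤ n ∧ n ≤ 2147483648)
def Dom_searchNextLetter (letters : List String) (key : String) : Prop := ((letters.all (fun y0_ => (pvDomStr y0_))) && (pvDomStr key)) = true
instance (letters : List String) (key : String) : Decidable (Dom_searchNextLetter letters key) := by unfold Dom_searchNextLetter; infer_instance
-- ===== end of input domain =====

-- B replaces A's hand-rolled binary search by a single left-to-right scan for the first element
-- strictly greater than key (objective: simpler); same wraparound `index % len` as A.

-- ===== PORT A =====
-- the while-loop of A: state (left, right), terminates because right + 1 - left shrinks
def searchNextLetterGoA (letters : List String) (key : String) (left right : Int) : Int :=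
  if h : left ≤ right then
    let middle := PySem.Int.floordiv (left + right) 2
    let current := PySem.List.pyGetD letters middle ""   -- in range whenever the loop is reached from A's initial state on a nonempty list
    if key < current then
      searchNextLetterGoA letters key left (middle - 1)
    else
      searchNextLetterGoA letters key (middle + 1) right
  else left
termination_by (right + 1 - left).toNat
decreasing_by
  · have := PySem.Int.floordiv_two_mid_bounds h
    omega
  · have := PySem.Int.floordiv_two_mid_bounds h
    omega

def searchNextLetter (letters : List String) (key : String) : String :=
  let left := searchNextLetterGoA letters key 0 ((letters.length : Int) - 1)
  PySem.List.pyGetD letters (PySem.Int.mod left (letters.length : Int)) ""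

-- ===== PORT B =====
-- B's scan `next((j for j, c in enumerate(letters) if c > key), len(letters))`
def searchNextLetterScanB (letters : List String) (key : String) : Nat :=
  match letters with
  | [] => 0
  | c :: rest => if key < c then 0 else searchNextLetterScanB rest key + 1

def searchNextLetter_alt (letters : List String) (key : String) : String :=
  PySem.List.pyGetD letters (PySem.Int.mod ((searchNextLetterScanB letters key : Nat) : Int) (letters.length : Int)) ""

-- ===== PRECONDITION & SPEC =====
-- Pre_ excludes the empty list, on which A raises ZeroDivisionError (and so does B), and unsorted
-- lists on which A's binary search is applied outside its sorted-input contract and returns an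
-- accidental element — except the order-independent cases (length ≤ 2, or key below all elements,
-- or key below none), where the two agree regardless of order and the claim keeps them.
def Pre_searchNextLetter (letters : List String) (key : String) : Prop :=
  letters ≠ [] ∧ (letters.Pairwise (fun a b => a.toList ≤ b.toList) ∨ letters.length ≤ 2 ∨
    (∀ c ∈ letters, key < c) ∨ (∀ c ∈ letters, ¬ key < c))
instance (letters : List String) (key : String) : Decidable (Pre_searchNextLetter letters key) := by unfold Pre_searchNextLetter; infer_instance
def pvWitness_searchNextLetter : List String × String := (["a", "c", "c", "f"], "c")

def Spec_searchNextLetter (letters : List String) (key : String) (out : String) : Prop := out = searchNextLetter_alt letters key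
instance (letters : List String) (key : String) (out : String) : Decidable (Spec_searchNextLetter letters key out) := by unfold Spec_searchNextLetter; infer_instance

-- ===== CLAIM (what is proved, stated in full; the proofs are below) =====
def Claim_equal_searchNextLetter : Prop := ∀ (letters : List String) (key : String), Dom_searchNextLetter letters key → Pre_searchNextLetter letters key → Spec_searchNextLetter letters key (searchNextLetter letters key)

-- ===== LEMMAS AND PROOFS =====

lemma scanB_le_length (letters : List String) (key : String) :
    searchNextLetterScanB letters key ≤ letters.length := by
  induction letters with
  | nil => simp [searchNextLetterScanB]
  | cons c rest ih =>
    simp only [searchNextLetterScanB, List.length_cons]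
    split <;> omega

lemma scanB_lower (letters : List String) (key : String) :
    ∀ i : Nat, i < searchNextLetterScanB letters key → ¬ key < letters.getD i "" := by
  induction letters with
  | nil => simp [searchNextLetterScanB]
  | cons c rest ih =>
    intro i hi
    simp only [searchNextLetterScanB] at hi
    split at hi
    · omega
    · cases i with
      | zero => simpa using ‹¬ key < c›
      | succ j => exact ih j (by omega)

lemma scanB_hit (letters : List String) (key : String)
    (h : searchNextLetterScanB letters key < letters.length) :
    key < letters.getD (searchNextLetterScanB letters key) "" := by
  induction letters with
  | nil => simp at h
  | cons c rest ih =>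
    simp only [searchNextLetterScanB] at h ⊢
    split at h <;> rename_i hc <;> simp only [if_pos, hc]
    · simpa using hc
    · simp only [List.length_cons] at h
      exact ih (by omega)

-- the two one-sided properties pin an index down uniquely
lemma scan_unique (letters : List String) (key : String) (n : Nat)
    (hle : n ≤ letters.length)
    (hlow : ∀ i : Nat, i < n → ¬ key < letters.getD i "")
    (hhit : n < letters.length → key < letters.getD n "") :
    n = searchNextLetterScanB letters key := by
  set m := searchNextLetterScanB letters key with hm
  rcases Nat.lt_trichotomy n m with h | h | h
  · exact absurd (hhit (lt_of_lt_of_le h (scanB_le_length letters key)))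
      (scanB_lower letters key n h)
  · exact h
  · exact absurd (scanB_hit letters key (lt_of_lt_of_le h hle))
      (hlow m h)

lemma sorted_getD_mono (letters : List String)
    (hs : letters.Pairwise (· ≤ ·)) {i j : Nat} (hij : i ≤ j) (hj : j < letters.length) :
    letters.getD i "" ≤ letters.getD j "" := by
  rcases Nat.eq_or_lt_of_le hij with rfl | hlt
  · exact le_refl _
  · have := (List.pairwise_iff_getElem.mp hs) i j (by omega) hj hlt
    rw [List.getD_eq_getElem letters "" (by omega), List.getD_eq_getElem letters "" hj]
    exact this

-- the loop invariant of A's binary search: everything left of `left` is ≤ key,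
-- everything right of `right` is > key; at exit `left` is the unique scan index
lemma goA_eq_scanB (letters : List String) (key : String)
    (hs : letters.Pairwise (· ≤ ·)) :
    ∀ (l r : Int), 0 ≤ l → r < (letters.length : Int) → l ≤ r + 1 →
    (∀ i : Nat, (i : Int) < l → ¬ key < letters.getD i "") →
    (∀ i : Nat, r < (i : Int) → i < letters.length → key < letters.getD i "") →
    searchNextLetterGoA letters key l r = ((searchNextLetterScanB letters key : Nat) : Int) := by
  intro l r
  induction l, r using searchNextLetterGoA.induct letters key with
  | case1 l r h middle current hk ih =>
    intro hl hr hlr hlow hhigh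
    have hmid := PySem.Int.floordiv_two_mid_bounds h
    rw [searchNextLetterGoA]
    simp only [dif_pos h]
    have hm0 : 0 ≤ middle := by omega
    have hmlen : middle < (letters.length : Int) := by omega
    have hcur : current = letters.getD middle.toNat "" := by
      show PySem.List.pyGetD letters middle "" = _
      rw [PySem.List.pyGetD_eq_getElem letters "" hm0 hmlen,
        List.getD_eq_getElem letters "" (by omega)]
    split
    · apply ih hl (by omega) (by omega) hlow
      intro i hi hilen
      rcases lt_or_ge r (i : Int) with hcase | hcase
      · exact hhigh i hcase hilen
      · have : middle.toNat ≤ i := by omega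
        exact lt_of_lt_of_le (hcur ▸ hk) (sorted_getD_mono letters hs this hilen)
    · exact absurd hk ‹¬ key < PySem.List.pyGetD letters (PySem.Int.floordiv (l + r) 2) ""›
  | case2 l r h middle current hk ih =>
    intro hl hr hlr hlow hhigh
    have hmid := PySem.Int.floordiv_two_mid_bounds h
    rw [searchNextLetterGoA]
    simp only [dif_pos h]
    have hm0 : 0 ≤ middle := by omega
    have hmlen : middle < (letters.length : Int) := by omega
    have hcur : current = letters.getD middle.toNat "" := by
      show PySem.List.pyGetD letters middle "" = _
      rw [PySem.List.pyGetD_eq_getElem letters "" hm0 hmlen,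
        List.getD_eq_getElem letters "" (by omega)]
    split
    · exact absurd ‹key < PySem.List.pyGetD letters (PySem.Int.floordiv (l + r) 2) ""› hk
    · apply ih (by omega) hr (by omega)
      · intro i hi
        rcases lt_or_ge (i : Int) l with hcase | hcase
        · exact hlow i hcase
        · intro hlt
          have hile : i ≤ middle.toNat := by omega
          have : letters.getD i "" ≤ letters.getD middle.toNat "" :=
            sorted_getD_mono letters hs hile (by omega)
          exact hk (hcur ▸ lt_of_lt_of_le hlt this)
      · exact hhigh
  | case3 l r h =>
    intro hl hr hlr hlow hhigh
    rw [searchNextLetterGoA]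
    simp only [dif_neg h]
    have hl_eq : l = ((l.toNat : Nat) : Int) := by omega
    rw [hl_eq]
    congr 1
    apply scan_unique letters key l.toNat (by omega)
    · intro i hi
      exact hlow i (by omega)
    · intro hlt
      exact hhigh l.toNat (by omega) hlt

lemma sorted_case (letters : List String) (key : String) (hne : letters ≠ [])
    (hs : letters.Pairwise (· ≤ ·)) :
    searchNextLetter letters key = searchNextLetter_alt letters key := by
  unfold searchNextLetter searchNextLetter_alt
  have hlen : 0 < letters.length := List.length_pos_iff.mpr hne
  rw [goA_eq_scanB letters key hs 0 ((letters.length : Int) - 1)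
    (by omega) (by omega) (by omega)
    (by intro i hi; omega)
    (by intro i hi hilen; omega)]

-- on a two-element list A and B agree whatever the order of the elements
lemma two_case (a b key : String) :
    searchNextLetter [a, b] key = searchNextLetter_alt [a, b] key := by
  unfold searchNextLetter searchNextLetter_alt
  by_cases h1 : key < a <;> by_cases h2 : key < b <;>
    simp [searchNextLetterGoA, searchNextLetterScanB, h1, h2,
      PySem.Int.floordiv, PySem.Int.mod, PySem.List.pyGetD, PySem.List.pyGet?,
      PySem.List.pyIdx?]

lemma goA_all_lt (letters : List String) (key : String)
    (hall : ∀ c ∈ letters, key < c) :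
    ∀ (l r : Int), 0 ≤ l → r < (letters.length : Int) →
      searchNextLetterGoA letters key l r = l := by
  intro l r
  induction l, r using searchNextLetterGoA.induct letters key with
  | case1 l r h middle current hk ih =>
    intro hl hr
    have hmid := PySem.Int.floordiv_two_mid_bounds h
    rw [searchNextLetterGoA]
    simp only [dif_pos h]
    rw [if_pos hk]
    exact ih hl (by omega)
  | case2 l r h middle current hk ih =>
    intro hl hr
    have hmid := PySem.Int.floordiv_two_mid_bounds h
    exact absurd (hall current (PySem.List.pyGetD_mem letters ""
      (by simp [PySem.Raise.InRange]; omega))) hk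
  | case3 l r h =>
    intro hl hr
    rw [searchNextLetterGoA]
    simp only [dif_neg h]

lemma goA_none_lt (letters : List String) (key : String)
    (hall : ∀ c ∈ letters, ¬ key < c) :
    ∀ (l r : Int), 0 ≤ l → r < (letters.length : Int) → l ≤ r + 1 →
      searchNextLetterGoA letters key l r = r + 1 := by
  intro l r
  induction l, r using searchNextLetterGoA.induct letters key with
  | case1 l r h middle current hk ih =>
    intro hl hr hlr
    have hmid := PySem.Int.floordiv_two_mid_bounds h
    exact absurd hk (hall current (PySem.List.pyGetD_mem letters ""
      (by simp [PySem.Raise.InRange]; omega)))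
  | case2 l r h middle current hk ih =>
    intro hl hr hlr
    have hmid := PySem.Int.floordiv_two_mid_bounds h
    rw [searchNextLetterGoA]
    simp only [dif_pos h]
    rw [if_neg hk]
    exact ih (by omega) hr (by omega)
  | case3 l r h =>
    intro hl hr hlr
    rw [searchNextLetterGoA]
    simp only [dif_neg h]
    omega

lemma scanB_all_lt (letters : List String) (key : String) (hne : letters ≠ [])
    (hall : ∀ c ∈ letters, key < c) :
    searchNextLetterScanB letters key = 0 := by
  cases letters with
  | nil => simp at hne
  | cons c rest => simp [searchNextLetterScanB, hall c (by simp)]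

lemma scanB_none_lt (letters : List String) (key : String)
    (hall : ∀ c ∈ letters, ¬ key < c) :
    searchNextLetterScanB letters key = letters.length := by
  induction letters with
  | nil => simp [searchNextLetterScanB]
  | cons c rest ih =>
    simp [searchNextLetterScanB, hall c (by simp)]
    exact ih fun x hx => hall x (by simp [hx])

lemma all_lt_case (letters : List String) (key : String) (hne : letters ≠ [])
    (hall : ∀ c ∈ letters, key < c) :
    searchNextLetter letters key = searchNextLetter_alt letters key := by
  have hlen : 0 < letters.length := List.length_pos_iff.mpr hne
  unfold searchNextLetter searchNextLetter_alt
  rw [goA_all_lt letters key hall 0 ((letters.length : Int) - 1) (by omega) (by omega),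
    scanB_all_lt letters key hne hall]
  norm_num

lemma none_lt_case (letters : List String) (key : String) (hne : letters ≠ [])
    (hall : ∀ c ∈ letters, ¬ key < c) :
    searchNextLetter letters key = searchNextLetter_alt letters key := by
  have hlen : 0 < letters.length := List.length_pos_iff.mpr hne
  unfold searchNextLetter searchNextLetter_alt
  rw [goA_none_lt letters key hall 0 ((letters.length : Int) - 1) (by omega) (by omega) (by omega),
    scanB_none_lt letters key hall]
  have h1 : (letters.length : Int) - 1 + 1 = ((letters.length : Nat) : Int) := by omega
  rw [h1]

-- ===== VERDICT (by name: the statement is the Claim_ definition above) =====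
theorem searchNextLetter_spec : Claim_equal_searchNextLetter := by
  intro letters key _hdom hpre
  obtain ⟨hne, hsor⟩ := hpre
  unfold Spec_searchNextLetter
  rcases hsor with hs' | hlen | hall | hall
  · exact sorted_case letters key hne (hs'.imp fun h => String.le_iff_toList_le.mpr h)
  · match letters, hne with
    | [a], _ => exact sorted_case [a] key (by simp) (by simp)
    | [a, b], _ => exact two_case a b key
    | a :: b :: c :: rest, _ => simp at hlen
  · exact all_lt_case letters key hne hall
  · exact none_lt_case letters key hne hall
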